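-- pv_equiv track=rewrite | github.com/lsdefine/bert_wwm_cn-en_pretrain | cetokenizer.py | restore_token_list
-- ===== SOURCE A (Python) =====
-- def restore_token_list(text, tokens):
--     if tokens[0] == '[CLS]': tokens = tokens[1:-1]
--     otokens = []; offset = 0
--     for x in tokens:
--         if x == '[UNK]': x = text[offset]
--         elif x == '□': x = ' '
--         elif x.startswith('##'): x = x[2:]
--         otokens.append(text[offset:offset+len(x)])
--         offset += len(x)
--     assert ''.join(otokens) == text
--     return otokens
-- ===== SOURCE B (Python) =====
-- def restore_token_list(text, tokens):
--     if tokens[0] == '[CLS]': tokens = tokens[1:-1]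
--     lengths = [1 if x == '[UNK]' or x == '□' else len(x) - 2 if x.startswith('##') else len(x)
--                for x in tokens]
--     starts = [0]
--     for n in lengths:
--         starts.append(starts[-1] + n)
--     otokens = [text[s:s + n] for s, n in zip(starts, lengths)]
--     assert ''.join(otokens) == text
--     return otokens
-- ===== Notes on version B (the rewrite author's own statement) =====
-- stated objective: alternative
-- what changed: A's single stateful loop (running offset, in-place token rewriting, append) is replaced by a two-pass decomposition: a list of effective token lengths, prefix-sum start offsets, and one zip/map comprehension of text slices.
import Mathlib
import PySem

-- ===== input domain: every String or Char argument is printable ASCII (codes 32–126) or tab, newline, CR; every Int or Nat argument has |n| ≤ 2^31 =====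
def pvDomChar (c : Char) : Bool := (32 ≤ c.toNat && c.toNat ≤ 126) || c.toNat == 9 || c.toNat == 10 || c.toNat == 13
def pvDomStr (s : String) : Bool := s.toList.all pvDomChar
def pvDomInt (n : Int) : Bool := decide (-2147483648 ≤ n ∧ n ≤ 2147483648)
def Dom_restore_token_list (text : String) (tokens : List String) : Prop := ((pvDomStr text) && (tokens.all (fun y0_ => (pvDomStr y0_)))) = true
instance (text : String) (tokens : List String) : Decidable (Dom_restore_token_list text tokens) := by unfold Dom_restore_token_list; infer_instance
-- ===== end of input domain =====

-- B replaces A's single stateful loop (running offset, conditional token rewriting, append) by a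
-- two-pass decomposition: effective lengths first, then prefix-sum start offsets, then one zip/map of
-- slices; objective: alternative (not measured faster). Equality claimed about the RETURN value.

-- ===== PORT A =====
-- tokens[0] == '[CLS]' check plus tokens[1:-1]; Python raises IndexError on empty tokens (excluded by Pre_).
def pvTrim (tokens : List String) : List String :=
  match tokens with
  | [] => []
  | t :: _ => if t = "[CLS]" then PySem.List.slice tokens (some 1) (some (-1)) else tokens

-- the loop body's rewriting of x; for '[UNK]', text[offset] raises IndexError when out of range
-- (PySem.Str.pyGet? = none there) — those inputs are excluded by Pre_, the default is never reached.
def pvFix (text : String) (off : Int) (x : String) : String :=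
  if x = "[UNK]" then String.ofList [(PySem.Str.pyGet? text off).getD ' ']
  else if x = "□" then " "
  else if PySem.Str.startswith x "##" then PySem.Str.slice x (some 2) none
  else x

-- A's loop: otokens.append(text[offset:offset+len(x)]); offset += len(x).
-- The final `assert ''.join(otokens) == text` raises exactly where Pre_ fails; no value effect inside Pre_.
def restore_token_list (text : String) (tokens : List String) : List String :=
  ((pvTrim tokens).foldl
    (fun (st : List String × Int) x =>
      (st.1 ++ [PySem.Str.slice text (some st.2) (some (st.2 + PySem.Str.len (pvFix text st.2 x)))],
       st.2 + PySem.Str.len (pvFix text st.2 x)))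
    (([] : List String), (0 : Int))).1

-- ===== PORT B =====
-- effective length of a token: 1 if x == '[UNK]' or x == '□' else len(x)-2 if x.startswith('##') else len(x)
def pvEffLen (x : String) : Int :=
  if x = "[UNK]" ∨ x = "□" then 1
  else if PySem.Str.startswith x "##" then PySem.Str.len x - 2
  else PySem.Str.len x

-- starts = [0]; for n in lengths: starts.append(starts[-1] + n)   (a scan producing the prefix sums)
def pvStarts (s : Int) : List Int → List Int
  | [] => [s]
  | n :: rest => s :: pvStarts (s + n) rest

-- B: lengths, then prefix-sum starts, then one comprehension of slices (zip truncates to `lengths`).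
-- B's `assert ''.join(otokens) == text` also raises exactly where Pre_ fails; no value effect inside Pre_.
def restore_token_list_alt (text : String) (tokens : List String) : List String :=
  ((pvStarts 0 ((pvTrim tokens).map pvEffLen)).zip ((pvTrim tokens).map pvEffLen)).map
    (fun p => PySem.Str.slice text (some p.1) (some (p.1 + p.2)))

-- ===== PRECONDITION & SPEC =====
-- '[UNK]' in-range check: every '[UNK]' token must sit at an offset inside the text, else A's
-- text[offset] raises IndexError (offsets are the prefix sums of the effective lengths).
def pvUnkOk (text : String) : Int → List String → Bool
  | _, [] => true
  | off, x :: rest =>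
      (if x = "[UNK]" then decide (off < PySem.Str.len text) else true) &&
      pvUnkOk text (off + pvEffLen x) rest

-- Pre_ holds exactly where Python A returns: tokens nonempty (tokens[0] raises IndexError on []),
-- every '[UNK]' offset in range (else IndexError), and the effective lengths cover the whole text
-- (else the final assert fails, since the joined slices are text[0:min(total,len(text))]).
def Pre_restore_token_list (text : String) (tokens : List String) : Prop :=
  tokens ≠ [] ∧
  pvUnkOk text 0 (pvTrim tokens) = true ∧
  PySem.Str.len text ≤ ((pvTrim tokens).map pvEffLen).sum
instance (text : String) (tokens : List String) : Decidable (Pre_restore_token_list text tokens) := by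
  unfold Pre_restore_token_list; infer_instance

def pvWitness_restore_token_list : String × List String := ("ab", ["a", "b"])

def Spec_restore_token_list (text : String) (tokens : List String) (out : List String) : Prop := out = restore_token_list_alt text tokens
instance (text : String) (tokens : List String) (out : List String) : Decidable (Spec_restore_token_list text tokens out) := by unfold Spec_restore_token_list; infer_instance

-- ===== CLAIM (what is proved, stated in full; the proofs are below) =====
def Claim_equal_restore_token_list : Prop := ∀ (text : String) (tokens : List String), Dom_restore_token_list text tokens → Pre_restore_token_list text tokens → Spec_restore_token_list text tokens (restore_token_list text tokens)

-- ===== LEMMAS AND PROOFS =====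

-- the rewritten token's length equals B's effective length (a '[UNK]' replacement is one character).
theorem pvLen_pvFix (text : String) (off : Int) (x : String) :
    PySem.Str.len (pvFix text off x) = pvEffLen x := by
  unfold pvFix pvEffLen
  by_cases h1 : x = "[UNK]"
  · simp [h1]
  · by_cases h2 : x = "□"
    · simp [h2]
    · by_cases h3 : PySem.Str.startswith x "##" = true
      · have h3' := h3
        rw [PySem.Str.startswith_eq] at h3'
        have hp : ("##" : String).toList <+: x.toList := (PySem.Chars.startswith_iff _ _).mp h3'
        have hl : 2 ≤ x.toList.length := by simpa using hp.length_le
        rw [if_neg h1, if_neg h2, if_pos h3,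
            if_neg (show ¬(x = "[UNK]" ∨ x = "□") by tauto), if_pos h3]
        simp only [PySem.Str.len_eq, PySem.Str.toList_slice, PySem.Chars.slice_eq_listSlice]
        rw [PySem.List.slice_from x.toList (show (0 : Int) ≤ 2 by norm_num)]
        simp only [List.length_drop]
        omega
      · rw [if_neg h1, if_neg h2, if_neg h3,
            if_neg (show ¬(x = "[UNK]" ∨ x = "□") by tauto), if_neg h3]

theorem pvKey (text : String) (tk : List String) :
    ∀ (off : Int) (acc : List String),
    (tk.foldl
      (fun (st : List String × Int) x =>
        (st.1 ++ [PySem.Str.slice text (some st.2) (some (st.2 + PySem.Str.len (pvFix text st.2 x)))],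
         st.2 + PySem.Str.len (pvFix text st.2 x)))
      (acc, off)).1
    = acc ++ ((pvStarts off (tk.map pvEffLen)).zip (tk.map pvEffLen)).map
        (fun p => PySem.Str.slice text (some p.1) (some (p.1 + p.2))) := by
  induction tk with
  | nil => intro off acc; simp [pvStarts]
  | cons x rest ih =>
      intro off acc
      simp only [List.foldl_cons, List.map_cons, pvStarts, List.zip_cons_cons, List.map]
      rw [ih, pvLen_pvFix]
      simp [List.append_assoc]

-- ===== VERDICT (by name: the statement is the Claim_ definition above) =====
theorem restore_token_list_spec : Claim_equal_restore_token_list := by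
  intro text tokens _hdom _hpre
  unfold Spec_restore_token_list restore_token_list restore_token_list_alt
  rw [pvKey]
  simp
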